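-- pv_equiv track=rewrite | github.com/SashaTlr/algos | Chpt8_DynamicProgramming/4_PowerSet.py | _convertToSet
-- ===== SOURCE A (Python) =====
-- def _convertToSet(item, full_set):
-- 	index = 0
-- 	subset = []
--
-- 	while item > 0:
-- 		if item & 1 is 1:
-- 			subset.append(full_set[index])
--
-- 		item >>= 1
-- 		index += 1
--
-- 	return subset
-- ===== SOURCE B (Python) =====
-- def _convertToSet(item, full_set):
--     # Walk the binary digit STRING of the mask most-significant-bit first,
--     # PREPENDING the selected element each time, so the result comes out
--     # in ascending bit order without ever shifting the integer.
--     if item <= 0: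
--         return []
--     bits = bin(item)[2:]          # MSB first
--     hi = len(bits) - 1
--     subset = []
--     for pos, ch in enumerate(bits):
--         if ch == '1':
--             subset = [full_set[hi - pos]] + subset
--     return subset
-- ===== Notes on version B (the rewrite author's own statement) =====
-- stated objective: alternative
-- what changed: B never shifts or masks the integer: it converts the mask once to its binary digit string, walks that string most-significant-bit first, and builds the subset back-to-front by prepending, instead of A's destructive shift-and-test loop that appends in ascending bit order.
import Mathlib
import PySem

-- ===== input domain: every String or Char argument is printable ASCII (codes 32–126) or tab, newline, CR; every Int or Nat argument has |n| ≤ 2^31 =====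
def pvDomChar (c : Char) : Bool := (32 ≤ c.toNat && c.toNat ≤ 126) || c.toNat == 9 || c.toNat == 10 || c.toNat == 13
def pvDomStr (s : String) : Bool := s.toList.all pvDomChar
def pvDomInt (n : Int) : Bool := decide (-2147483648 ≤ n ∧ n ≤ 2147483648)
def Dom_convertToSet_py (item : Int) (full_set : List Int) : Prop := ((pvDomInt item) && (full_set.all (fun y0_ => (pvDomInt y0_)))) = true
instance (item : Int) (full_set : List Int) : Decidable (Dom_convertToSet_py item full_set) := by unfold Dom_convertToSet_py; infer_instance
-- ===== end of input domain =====

-- B replaces A's destructive shift-and-test loop by one walk over the mask's binary digit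
-- string, most-significant bit first, building the subset back-to-front (objective: alternative).

-- ===== PORT A =====
-- the while loop of A: shifts item, bumps index, appends full_set[index] on each set bit
def convertToSetLoop (item : Int) (full_set : List Int) (index : Nat) (subset : List Int) : List Int :=
  if h : 0 < item then
    -- 'if item & 1 is 1' on a positive int is 'item % 2 == 1'
    let subset' := if PySem.Int.mod item 2 = 1 then subset ++ [PySem.List.pyGetD full_set (index : Int) 0] else subset
    convertToSetLoop (PySem.Int.floordiv item 2) full_set (index + 1) subset'
  else subset
termination_by item.toNat
decreasing_by
  rw [PySem.Int.floordiv_eq_ediv_of_pos (by omega : (0:Int) < 2)]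
  omega

def convertToSet_py (item : Int) (full_set : List Int) : List Int :=
  convertToSetLoop item full_set 0 []

-- ===== PORT B =====
-- bin(n)[2:] for n ≥ 1 (most-significant digit first); Python's bin, ported by hand (exact for n ≥ 1)
def binCharsNat (n : Nat) : List Char :=
  if n ≤ 1 then [if n = 1 then '1' else '0']
  else binCharsNat (n / 2) ++ [if n % 2 = 1 then '1' else '0']
termination_by n
decreasing_by omega

-- the for loop of Source B: enumerate the digit string, prepend full_set[hi - pos] on each '1'
def convertToSet_py_alt (item : Int) (full_set : List Int) : List Int :=
  if item ≤ 0 then []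
  else
    let bits := binCharsNat item.toNat
    let hi : Int := (bits.length : Int) - 1
    (PySem.List.enumerate bits 0).foldl
      (fun subset pc =>
        if pc.2 = '1' then PySem.List.pyGetD full_set (hi - pc.1) 0 :: subset else subset) []

-- ===== PRECONDITION & SPEC =====
-- Pre_ excludes exactly the inputs on which A raises IndexError: a positive mask with a set bit
-- at a position ≥ len(full_set), i.e. item ≥ 2^len. Nothing A returns on is excluded.
def Pre_convertToSet_py (item : Int) (full_set : List Int) : Prop :=
  item < (2:Int) ^ full_set.length
instance (item : Int) (full_set : List Int) : Decidable (Pre_convertToSet_py item full_set) := by unfold Pre_convertToSet_py; infer_instance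

def pvWitness_convertToSet_py : Int × List Int := (5, [10, 20, 30])

def Spec_convertToSet_py (item : Int) (full_set : List Int) (out : List Int) : Prop := out = convertToSet_py_alt item full_set
instance (item : Int) (full_set : List Int) (out : List Int) : Decidable (Spec_convertToSet_py item full_set out) := by unfold Spec_convertToSet_py; infer_instance

-- ===== CLAIM (what is proved, stated in full; the proofs are below) =====
def Claim_equal_convertToSet_py : Prop := ∀ (item : Int) (full_set : List Int), Dom_convertToSet_py item full_set → Pre_convertToSet_py item full_set → Spec_convertToSet_py item full_set (convertToSet_py item full_set)

-- ===== LEMMAS AND PROOFS =====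

-- ascending list of the set-bit positions of n (the common reference both ports are reduced to)
def bitPos (n : Nat) : List Int :=
  if n = 0 then []
  else (if n % 2 = 1 then [(0:Int)] else []) ++ (bitPos (n / 2)).map (· + 1)
termination_by n
decreasing_by omega

theorem bitPos_pos (n : Nat) (h : n ≠ 0) :
    bitPos n = (if n % 2 = 1 then [(0:Int)] else []) ++ (bitPos (n / 2)).map (· + 1) := by
  conv_lhs => rw [bitPos]
  rw [if_neg h]

-- A's loop returns acc ++ the elements at the set-bit positions (shifted by index), in ascending order
theorem loop_eq_bitPos (n : Nat) (item : Int) (fs : List Int) (index : Nat) (acc : List Int)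
    (hn : item.toNat = n) :
    convertToSetLoop item fs index acc
      = acc ++ (bitPos item.toNat).map (fun i => PySem.List.pyGetD fs ((index : Int) + i) 0) := by
  induction n using Nat.strong_induction_on generalizing item index acc with
  | _ n ih =>
    by_cases hpos : 0 < item
    · have hfd : PySem.Int.floordiv item 2 = item / 2 :=
        PySem.Int.floordiv_eq_ediv_of_pos (by omega)
      have hmd : PySem.Int.mod item 2 = item % 2 :=
        PySem.Int.mod_eq_emod_of_pos (by omega)
      have htd : (PySem.Int.floordiv item 2).toNat = item.toNat / 2 := by rw [hfd]; omega
      have hdec : (PySem.Int.floordiv item 2).toNat < n := by rw [htd]; omega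
      have hIH : ∀ acc' : List Int,
          convertToSetLoop (PySem.Int.floordiv item 2) fs (index + 1) acc'
            = acc' ++ (bitPos (item.toNat / 2)).map
                (fun i => PySem.List.pyGetD fs (((index + 1 : Nat) : Int) + i) 0) := by
        intro acc'
        have := ih _ hdec (PySem.Int.floordiv item 2) (index + 1) acc' rfl
        rwa [htd] at this
      have hshift : (bitPos (item.toNat / 2)).map
            (fun i => PySem.List.pyGetD fs (((index + 1 : Nat) : Int) + i) 0)
          = ((bitPos (item.toNat / 2)).map (· + 1)).map
              (fun i => PySem.List.pyGetD fs ((index : Int) + i) 0) := by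
        rw [List.map_map]
        apply List.map_congr_left
        intro i _
        simp only [Function.comp]
        congr 1
        push_cast
        ring
      have hbp : bitPos item.toNat
          = (if item.toNat % 2 = 1 then [(0:Int)] else [])
              ++ (bitPos (item.toNat / 2)).map (· + 1) := by
        rw [bitPos, if_neg (by omega)]
      rw [convertToSetLoop, dif_pos hpos]
      by_cases hb : PySem.Int.mod item 2 = 1
      · rw [if_pos hb, hIH, hshift, hbp, if_pos (by rw [hmd] at hb; omega)]
        simp
      · rw [if_neg hb, hIH, hshift, hbp, if_neg (by rw [hmd] at hb; omega)]
        simp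
    · rw [convertToSetLoop, dif_neg hpos]
      have : item.toNat = 0 := by omega
      rw [this, bitPos, if_pos rfl]
      simp

-- the prepend-fold of Source B is the reverse of keeping v on each '1'
theorem foldl_prepend (v : Int × Char → Int) (l : List (Int × Char)) (acc : List Int) :
    l.foldl (fun s pc => if pc.2 = '1' then v pc :: s else s) acc
      = (l.filterMap (fun pc => if pc.2 = '1' then some (v pc) else none)).reverse ++ acc := by
  induction l generalizing acc with
  | nil => simp
  | cons p rest ih =>
    by_cases hp : p.2 = '1'
    · simp [List.foldl_cons, hp, ih]
    · simp [List.foldl_cons, hp, ih]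

-- positions selected from the digit string: hi - pos for each '1'
def selPos (bits : List Char) (hi : Int) (s : Int) : List Int :=
  (PySem.List.enumerate bits s).filterMap (fun pc => if pc.2 = '1' then some (hi - pc.1) else none)

theorem selPos_cons (c : Char) (bits : List Char) (hi s : Int) :
    selPos (c :: bits) hi s
      = (if c = '1' then [hi - s] else []) ++ selPos bits hi (s + 1) := by
  unfold selPos
  rw [PySem.List.enumerate_cons]
  by_cases hc : c = '1' <;> simp [hc]

theorem selPos_succ (bits : List Char) (h s : Int) :
    selPos bits (h + 1) s = (selPos bits h s).map (· + 1) := by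
  induction bits generalizing s with
  | nil => simp [selPos, PySem.List.enumerate_nil]
  | cons c rest ih =>
    rw [selPos_cons, selPos_cons, List.map_append, ih]
    by_cases hc : c = '1'
    · simp only [hc, if_pos rfl]
      have : h + 1 - s = (h - s) + 1 := by ring
      simp [this]
    · simp [hc]

theorem selPos_append_singleton (bits : List Char) (d : Char) (hi s : Int) :
    selPos (bits ++ [d]) hi s
      = selPos bits hi s ++ (if d = '1' then [hi - (s + bits.length)] else []) := by
  unfold selPos
  rw [PySem.List.enumerate_append, List.filterMap_append]
  congr 1
  rw [PySem.List.enumerate_cons, PySem.List.enumerate_nil]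
  by_cases hd : d = '1' <;> simp [hd]

theorem length_binCharsNat_pos (n : Nat) : 0 < (binCharsNat n).length := by
  rw [binCharsNat]
  split <;> simp

-- the digit string of n, read LSB-first via hi - pos, yields exactly the set-bit positions ascending
theorem selPos_binCharsNat (n : Nat) (hn : 1 ≤ n) :
    (selPos (binCharsNat n) (((binCharsNat n).length : Int) - 1) 0).reverse = bitPos n := by
  induction n using Nat.strong_induction_on with
  | _ n ih =>
    by_cases h1 : n ≤ 1
    · have hn1 : n = 1 := by omega
      subst hn1
      rw [binCharsNat]
      simp only [if_pos (by omega : 1 ≤ 1)]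
      rw [bitPos]
      norm_num
      rw [selPos_cons]
      simp [selPos, PySem.List.enumerate_nil, bitPos]
    · have hrec : binCharsNat n
          = binCharsNat (n / 2) ++ [if n % 2 = 1 then '1' else '0'] := by
        rw [binCharsNat, if_neg h1]
      have hlpos := length_binCharsNat_pos (n / 2)
      have hlen : ((binCharsNat n).length : Int) - 1 = ((binCharsNat (n / 2)).length : Int) := by
        rw [hrec]; simp
      have hIH := ih (n / 2) (by omega) (by omega)
      have hss : selPos (binCharsNat (n / 2)) ((binCharsNat (n / 2)).length : Int) 0
          = (selPos (binCharsNat (n / 2)) (((binCharsNat (n / 2)).length : Int) - 1) 0).map (· + 1) := by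
        rw [← selPos_succ]
        ring_nf
      have hbp : bitPos n = (if n % 2 = 1 then [(0:Int)] else []) ++ (bitPos (n / 2)).map (· + 1) :=
        bitPos_pos n (by omega)
      rw [hlen, hrec, selPos_append_singleton, List.reverse_append, hss, ← List.map_reverse, hIH,
        hbp]
      by_cases hodd : n % 2 = 1
      · simp [hodd]
      · simp [hodd]

-- B (for positive item) also returns the elements at the set-bit positions, ascending
theorem alt_eq_bitPos (item : Int) (fs : List Int) (hpos : 0 < item) :
    convertToSet_py_alt item fs
      = (bitPos item.toNat).map (fun i => PySem.List.pyGetD fs i 0) := by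
  unfold convertToSet_py_alt
  rw [if_neg (by omega)]
  rw [foldl_prepend (fun pc => PySem.List.pyGetD fs (((binCharsNat item.toNat).length : Int) - 1 - pc.1) 0)]
  have hfm : (PySem.List.enumerate (binCharsNat item.toNat) 0).filterMap
        (fun pc => if pc.2 = '1'
          then some (PySem.List.pyGetD fs (((binCharsNat item.toNat).length : Int) - 1 - pc.1) 0)
          else none)
      = (selPos (binCharsNat item.toNat) (((binCharsNat item.toNat).length : Int) - 1) 0).map
          (fun i => PySem.List.pyGetD fs i 0) := by
    unfold selPos
    rw [List.map_filterMap]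
    apply List.filterMap_congr
    intro pc _
    by_cases hc : pc.2 = '1' <;> simp [hc]
  rw [hfm, ← List.map_reverse, selPos_binCharsNat item.toNat (by omega)]
  simp

-- ===== VERDICT (by name: the statement is the Claim_ definition above) =====
theorem convertToSet_py_spec : Claim_equal_convertToSet_py := by
  intro item fs _hdom _hpre
  unfold Spec_convertToSet_py convertToSet_py
  by_cases hpos : 0 < item
  · rw [alt_eq_bitPos item fs hpos,
        loop_eq_bitPos item.toNat item fs 0 [] rfl]
    simp
  · rw [convertToSetLoop, dif_neg hpos]
    unfold convertToSet_py_alt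
    rw [if_pos (by omega)]
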